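-- pv_equiv track=rewrite | github.com/subinium/ProjectEuler | solved/p622.py | f
-- ===== SOURCE A (Python) =====
-- def f(n):
--   n = (2**n)-1
--   ret = 0
--   for i in range(1,n+1):
--     if i * i > n :
--       break
--     if n % i == 0:
--       ret += i + n//i + 2
--   return ret
-- ===== SOURCE B (Python) =====
-- def f(n):
--     N = (2 ** n) - 1
--     if N <= 0:
--         return 0
--     # factorize N by trial division with a shrinking bound
--     fac = []
--     m = N
--     d = 2
--     while d * d <= m:
--         if m % d == 0:
--             a = 0
--             while m % d == 0:
--                 m //= d
--                 a += 1
--             fac.append((d, a))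
--         d += 1
--     if m > 1:
--         fac.append((m, 1))
--     # enumerate all divisors from the factorization
--     divs = [1]
--     for (p, a) in fac:
--         divs = [q * p ** b for q in divs for b in range(a + 1)]
--     # sum the pair contributions over divisors not exceeding sqrt(N)
--     ret = 0
--     for q in divs:
--         if q * q <= N:
--             ret += q + N // q + 2
--     return ret
-- ===== Notes on version B (the rewrite author's own statement) =====
-- stated objective: alternative
-- what changed: A scans every candidate i up to sqrt(N) testing divisibility; B factorizes N by trial division with a bound that shrinks as factors are divided out, enumerates all divisors from the prime factorization, and sums the same pair contributions over that divisor list.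
import Mathlib
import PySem

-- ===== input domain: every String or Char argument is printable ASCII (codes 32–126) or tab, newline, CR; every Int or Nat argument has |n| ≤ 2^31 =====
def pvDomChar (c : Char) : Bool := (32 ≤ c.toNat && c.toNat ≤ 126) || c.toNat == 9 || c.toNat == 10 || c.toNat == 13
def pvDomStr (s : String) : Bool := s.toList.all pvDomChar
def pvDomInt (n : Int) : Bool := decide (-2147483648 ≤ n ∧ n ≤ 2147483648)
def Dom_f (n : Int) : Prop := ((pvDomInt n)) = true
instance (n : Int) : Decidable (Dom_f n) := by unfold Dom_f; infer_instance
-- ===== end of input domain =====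

-- B replaces A's full scan up to sqrt(N) by factorize-then-enumerate-divisors (trial division with a
-- bound that shrinks as factors are divided out), summing the same pair contributions over the divisor list.

-- ===== PORT A =====
-- the for-loop 'for i in range(1, n+1)' with break; fuel = length of the range
def loopA (N : Int) (fuel : Nat) (i ret : Int) : Int :=
  match fuel with
  | 0 => ret
  | fu + 1 =>
    if i * i > N then ret
    else loopA N fu (i + 1)
      (if PySem.Int.mod N i = 0 then ret + i + PySem.Int.floordiv N i + 2 else ret)

def f (n : Int) : Int :=
  let N : Int := 2 ^ n.toNat - 1
  loopA N N.toNat 1 0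

-- ===== PORT B =====
-- inner 'while m % d == 0: m //= d; a += 1' (fuel m.toNat suffices: m shrinks each pass)
def divOut (fuel : Nat) (m d : Int) : Int × Int :=
  match fuel with
  | 0 => (m, 0)
  | fu + 1 =>
    if PySem.Int.mod m d = 0 then
      let r := divOut fu (PySem.Int.floordiv m d) d
      (r.1, r.2 + 1)
    else (m, 0)

-- outer 'while d * d <= m' trial-division loop collecting (prime, exponent) pairs
def factLoop (fuel : Nat) (m d : Int) (fac : List (Int × Int)) : Int × List (Int × Int) :=
  match fuel with
  | 0 => (m, fac)
  | fu + 1 =>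
    if d * d ≤ m then
      if PySem.Int.mod m d = 0 then
        let r := divOut m.toNat m d
        factLoop fu r.1 (d + 1) (fac ++ [(d, r.2)])
      else factLoop fu m (d + 1) fac
    else (m, fac)

-- '[q * p ** b for q in divs for b in range(a + 1)]'
def expandDivs (divs : List Int) (p a : Int) : List Int :=
  divs.flatMap (fun q => (PySem.List.pyRange 0 (a + 1) 1).map (fun b => q * p ^ b.toNat))

def f_alt (n : Int) : Int :=
  let N : Int := 2 ^ n.toNat - 1
  if N ≤ 0 then 0
  else
    let r := factLoop N.toNat N 2 []
    let fac := if r.1 > 1 then r.2 ++ [(r.1, 1)] else r.2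
    let divs := fac.foldl (fun ds pa => expandDivs ds pa.1 pa.2) [1]
    divs.foldl (fun ret q =>
      if q * q ≤ N then ret + q + PySem.Int.floordiv N q + 2 else ret) 0

-- ===== PRECONDITION & SPEC =====
-- For negative n Python A raises TypeError (range over a float 2**n - 1); Pre_f keeps exactly the inputs on which A returns.
def Pre_f (n : Int) : Prop := 0 ≤ n
instance (n : Int) : Decidable (Pre_f n) := by unfold Pre_f; infer_instance
def pvWitness_f : Int := 6


def Spec_f (n : Int) (out : Int) : Prop := out = f_alt n
instance (n : Int) (out : Int) : Decidable (Spec_f n out) := by unfold Spec_f; infer_instance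

-- ===== CLAIM (what is proved, stated in full; the proofs are below) =====
def Claim_equal_f : Prop := ∀ (n : Int), Dom_f n → Pre_f n → Spec_f n (f n)

-- ===== LEMMAS AND PROOFS =====

-- Nat-level models of B's divisor enumeration (proof-only ghosts)
def expN (ds : List ℕ) (p a : ℕ) : List ℕ :=
  ds.flatMap (fun q => (List.range (a + 1)).map (fun b => q * p ^ b))

def divsN (F : List (ℕ × ℕ)) : List ℕ :=
  F.foldl (fun ds pa => expN ds pa.1 pa.2) [1]

def prodF (F : List (ℕ × ℕ)) : ℕ := (F.map (fun pa => pa.1 ^ pa.2)).prod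

def GoodF (F : List (ℕ × ℕ)) : Prop :=
  (∀ pa ∈ F, Nat.Prime pa.1) ∧ (F.map Prod.fst).Pairwise (· < ·)

-- the contribution summed for each divisor pair
def contrib (M j : ℕ) : Int := (j : Int) + ((M / j : ℕ) : Int) + 2

-- ---- A-side characterisation ----
theorem loopA_eq_sum (M : ℕ) : ∀ (fuel : Nat) (i : ℕ) (ret : Int), 1 ≤ i →
    Nat.sqrt M + 1 ≤ i + fuel →
    loopA (M : Int) fuel (i : Int) ret
      = ret + ∑ j ∈ M.divisors.filter (fun j => i ≤ j ∧ j * j ≤ M), contrib M j := by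
  intro fuel
  induction fuel with
  | zero =>
    intro i ret h1 hb
    have hempty : M.divisors.filter (fun j => i ≤ j ∧ j * j ≤ M) = ∅ := by
      apply Finset.filter_eq_empty_iff.mpr
      rintro j hjd ⟨hij, hjj⟩
      have : j ≤ Nat.sqrt M := Nat.le_sqrt.mpr hjj
      omega
    simp [loopA, hempty]
  | succ fu ih =>
    intro i ret h1 hb
    simp only [loopA]
    by_cases hbr : M < i * i
    · have hbr' : (i : Int) * i > (M : Int) := by exact_mod_cast hbr
      rw [if_pos hbr']
      have hempty : M.divisors.filter (fun j => i ≤ j ∧ j * j ≤ M) = ∅ := by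
        apply Finset.filter_eq_empty_iff.mpr
        rintro j hjd ⟨hij, hjj⟩
        have : i * i ≤ j * j := Nat.mul_le_mul hij hij
        omega
      simp [hempty]
    · rw [not_lt] at hbr
      have hbr' : ¬ ((i : Int) * i > (M : Int)) := not_lt.mpr (by exact_mod_cast hbr)
      rw [if_neg hbr']
      have hM1 : 1 ≤ M := le_trans (Nat.mul_le_mul h1 h1) hbr
      have hisqrt : i ≤ Nat.sqrt M := Nat.le_sqrt.mpr hbr
      have hmodeq : (PySem.Int.mod (M : Int) (i : Int) = 0) ↔ i ∣ M := by
        rw [PySem.Int.mod_natCast]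
        norm_cast
        exact Iff.symm Nat.dvd_iff_mod_eq_zero
      have hrec := ih (i + 1) (if PySem.Int.mod (M : Int) (i : Int) = 0
          then ret + (i : Int) + PySem.Int.floordiv (M : Int) (i : Int) + 2 else ret)
        (by omega) (by omega)
      have hcast : ((i : Int) + 1) = ((i + 1 : ℕ) : Int) := by push_cast; ring
      rw [hcast, hrec]
      by_cases hd : i ∣ M
      · have hsplit : M.divisors.filter (fun j => i ≤ j ∧ j * j ≤ M)
            = insert i (M.divisors.filter (fun j => i + 1 ≤ j ∧ j * j ≤ M)) := by
          ext j
          simp only [Finset.mem_insert, Finset.mem_filter, Nat.mem_divisors]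
          constructor
          · rintro ⟨⟨hjM, _⟩, hij, hjj⟩
            by_cases hj : j = i
            · exact Or.inl hj
            · exact Or.inr ⟨⟨hjM, by omega⟩, by omega, hjj⟩
          · rintro (rfl | ⟨⟨hjM, hM0⟩, hij, hjj⟩)
            · exact ⟨⟨hd, by omega⟩, le_refl _, hbr⟩
            · exact ⟨⟨hjM, hM0⟩, by omega, hjj⟩
        have hnotmem : i ∉ M.divisors.filter (fun j => i + 1 ≤ j ∧ j * j ≤ M) := by
          simp only [Finset.mem_filter]
          rintro ⟨_, hii, _⟩
          omega
        rw [if_pos (hmodeq.mpr hd), hsplit, Finset.sum_insert hnotmem]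
        rw [PySem.Int.floordiv_natCast]
        simp only [contrib]
        ring
      · have hsplit : M.divisors.filter (fun j => i ≤ j ∧ j * j ≤ M)
            = M.divisors.filter (fun j => i + 1 ≤ j ∧ j * j ≤ M) := by
          ext j
          simp only [Finset.mem_filter, Nat.mem_divisors]
          constructor
          · rintro ⟨⟨hjM, hM0⟩, hij, hjj⟩
            have : j ≠ i := by rintro rfl; exact hd hjM
            exact ⟨⟨hjM, hM0⟩, by omega, hjj⟩
          · rintro ⟨⟨hjM, hM0⟩, hij, hjj⟩
            exact ⟨⟨hjM, hM0⟩, by omega, hjj⟩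
        rw [if_neg (by simpa using fun h => hd (hmodeq.mp h)), hsplit]

-- ---- B-side: divOut ----
theorem divOut_spec : ∀ (fuel : Nat) (m d : ℕ), 2 ≤ d → 1 ≤ m → m ≤ fuel →
    ∃ (m' a : ℕ), divOut fuel (m : Int) (d : Int) = ((m' : Int), (a : Int)) ∧
      m = m' * d ^ a ∧ ¬ d ∣ m' ∧ 1 ≤ m' := by
  intro fuel
  induction fuel with
  | zero => intro m d _ h1 hf; omega
  | succ fu ih =>
    intro m d h2 h1 hf
    have hmodeq : (PySem.Int.mod (m : Int) (d : Int) = 0) ↔ d ∣ m := by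
      rw [PySem.Int.mod_natCast]
      norm_cast
      exact Iff.symm Nat.dvd_iff_mod_eq_zero
    simp only [divOut]
    by_cases hd : d ∣ m
    · rw [if_pos (hmodeq.mpr hd), PySem.Int.floordiv_natCast]
      have hd1 : 1 ≤ m / d := (Nat.one_le_div_iff (by omega)).mpr (Nat.le_of_dvd h1 hd)
      have hlt : m / d < m := Nat.div_lt_self h1 (by omega)
      obtain ⟨m', a, heq, hfact, hnd, hm'⟩ := ih (m / d) d h2 hd1 (by omega)
      refine ⟨m', a + 1, ?_, ?_, hnd, hm'⟩
      · rw [heq]; push_cast; ring_nf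
      · have : m = (m / d) * d := (Nat.div_mul_cancel hd).symm
        rw [this, hfact, pow_succ]; ring
    · rw [if_neg (by simpa using fun h => hd (hmodeq.mp h))]
      exact ⟨m, 0, by norm_num, by simp, by simpa using hd, h1⟩

-- ---- B-side: factLoop ----
theorem factLoop_spec : ∀ (fuel : Nat) (m d : ℕ) (L : List (ℕ × ℕ)), 2 ≤ d → 1 ≤ m →
    m + 1 ≤ d + fuel →
    (∀ p, Nat.Prime p → p ∣ m → d ≤ p) →
    (∀ pa ∈ L, Nat.Prime pa.1 ∧ pa.1 < d) →
    (L.map Prod.fst).Pairwise (· < ·) →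
    ∃ (m' : ℕ) (L' : List (ℕ × ℕ)) (d' : ℕ),
      factLoop fuel (m : Int) (d : Int) (L.map (fun pa => ((pa.1 : Int), (pa.2 : Int))))
        = ((m' : Int), L'.map (fun pa => ((pa.1 : Int), (pa.2 : Int)))) ∧
      m' * prodF L' = m * prodF L ∧
      (∀ pa ∈ L', Nat.Prime pa.1 ∧ pa.1 < d') ∧
      (L'.map Prod.fst).Pairwise (· < ·) ∧
      1 ≤ m' ∧ m' < d' * d' ∧ (∀ p, Nat.Prime p → p ∣ m' → d' ≤ p) := by
  intro fuel
  induction fuel with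
  | zero =>
    intro m d L h2 h1 hf hmin hL hpw
    simp only [factLoop]
    refine ⟨m, L, d, rfl, rfl, hL, hpw, h1, ?_, hmin⟩
    calc m < d := by omega
      _ ≤ d * d := Nat.le_mul_of_pos_left d (by omega)
  | succ fu ih =>
    intro m d L h2 h1 hf hmin hL hpw
    have hmodeq : (PySem.Int.mod (m : Int) (d : Int) = 0) ↔ d ∣ m := by
      rw [PySem.Int.mod_natCast]
      norm_cast
      exact Iff.symm Nat.dvd_iff_mod_eq_zero
    simp only [factLoop]
    by_cases hguard : d * d ≤ m
    · have hguard' : ((d : Int) * d ≤ (m : Int)) := by exact_mod_cast hguard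
      rw [if_pos hguard']
      by_cases hd : d ∣ m
      · rw [if_pos (hmodeq.mpr hd)]
        obtain ⟨m'', a, heqd, hfact, hndvd, hm''⟩ := divOut_spec m m d h2 h1 (le_refl m)
        have htn : ((m : Int)).toNat = m := Int.toNat_natCast m
        have hdprime : Nat.Prime d := by
          have hmf := Nat.minFac_prime (show d ≠ 1 by omega)
          have hdvd' : d.minFac ∣ m := dvd_trans (Nat.minFac_dvd d) hd
          have hge : d ≤ d.minFac := hmin _ hmf hdvd'
          have hle : d.minFac ≤ d := Nat.minFac_le (by omega)
          have heq : d.minFac = d := le_antisymm hle hge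
          exact heq ▸ hmf
        have ha1 : 1 ≤ a := by
          rcases Nat.eq_zero_or_pos a with rfl | hp
          · simp only [pow_zero, mul_one] at hfact
            exact absurd (hfact ▸ hd) hndvd
          · exact hp
        have hm''lt : m'' < m := by
          have hda : d ≤ d ^ a := Nat.le_self_pow (by omega) d
          calc m'' = m'' * 1 := (mul_one m'').symm
            _ < m'' * d ^ a := Nat.mul_lt_mul_of_le_of_lt (le_refl m'') (by omega) (by omega)
            _ = m := hfact.symm
        have hminNew : ∀ p, Nat.Prime p → p ∣ m'' → d + 1 ≤ p := by
          intro p hp hpd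
          have hpm : p ∣ m := hfact ▸ dvd_mul_of_dvd_left hpd _
          have hge := hmin p hp hpm
          have hne : p ≠ d := by rintro rfl; exact hndvd hpd
          omega
        have hLnew : ∀ pa ∈ L ++ [(d, a)], Nat.Prime pa.1 ∧ pa.1 < d + 1 := by
          intro pa hpa
          rcases List.mem_append.mp hpa with h | h
          · obtain ⟨hp, hlt⟩ := hL pa h
            exact ⟨hp, by omega⟩
          · simp only [List.mem_singleton] at h
            subst h
            exact ⟨hdprime, by omega⟩
        have hpwnew : ((L ++ [(d, a)]).map Prod.fst).Pairwise (· < ·) := by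
          rw [List.map_append, List.pairwise_append]
          refine ⟨hpw, by simp, ?_⟩
          intro x hx y hy
          simp only [List.map_singleton, List.mem_singleton] at hy
          subst hy
          obtain ⟨pa, hpa, rfl⟩ := List.mem_map.mp hx
          exact (hL pa hpa).2
        obtain ⟨m', L', d', heq2, hprod, hL', hpw', hm', hlt', hmin'⟩ :=
          ih m'' (d + 1) (L ++ [(d, a)]) (by omega) hm'' (by omega) hminNew hLnew hpwnew
        refine ⟨m', L', d', ?_, ?_, hL', hpw', hm', hlt', hmin'⟩
        · rw [htn, heqd]
          have hc1 : ((d : Int) + 1) = ((d + 1 : ℕ) : Int) := by push_cast; ring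
          have hc2 : (L.map (fun pa => ((pa.1 : Int), (pa.2 : Int)))) ++ [((d : Int), (a : Int))]
              = (L ++ [(d, a)]).map (fun pa => ((pa.1 : Int), (pa.2 : Int))) := by
            simp
          rw [hc1, hc2, heq2]
        · rw [hprod]
          unfold prodF
          rw [List.map_append, List.prod_append]
          simp only [List.map_singleton, List.prod_singleton]
          calc m'' * ((L.map fun pa => pa.1 ^ pa.2).prod * d ^ a)
              = (m'' * d ^ a) * (L.map fun pa => pa.1 ^ pa.2).prod := by ring
            _ = m * (L.map fun pa => pa.1 ^ pa.2).prod := by rw [← hfact]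
      · rw [if_neg (by simpa using fun h => hd (hmodeq.mp h))]
        have hminNew : ∀ p, Nat.Prime p → p ∣ m → d + 1 ≤ p := by
          intro p hp hpd
          have hge := hmin p hp hpd
          have hne : p ≠ d := by rintro rfl; exact hd hpd
          omega
        have hLnew : ∀ pa ∈ L, Nat.Prime pa.1 ∧ pa.1 < d + 1 := by
          intro pa hpa
          obtain ⟨hp, hlt⟩ := hL pa hpa
          exact ⟨hp, by omega⟩
        obtain ⟨m', L', d', heq2, hprod, hL', hpw', hm', hlt', hmin'⟩ :=
          ih m (d + 1) L (by omega) h1 (by omega) hminNew hLnew hpw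
        refine ⟨m', L', d', ?_, hprod, hL', hpw', hm', hlt', hmin'⟩
        have hc1 : ((d : Int) + 1) = ((d + 1 : ℕ) : Int) := by push_cast; ring
        rw [hc1, heq2]
    · rw [if_neg (by exact_mod_cast hguard)]
      exact ⟨m, L, d, rfl, rfl, hL, hpw, h1, by omega, hmin⟩

-- ---- B-side: divisor enumeration ----
theorem foldl_expN (F : List (ℕ × ℕ)) : ∀ (ds : List ℕ),
    F.foldl (fun ds pa => expN ds pa.1 pa.2) ds
      = ds.flatMap (fun q => (divsN F).map (fun r => q * r)) := by
  induction F with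
  | nil => intro ds; simp [divsN, expN]
  | cons pa F ih =>
    intro ds
    simp only [List.foldl_cons]
    rw [ih (expN ds pa.1 pa.2)]
    have hD : divsN (pa :: F) = (expN [1] pa.1 pa.2).flatMap
        (fun q => (divsN F).map (fun r => q * r)) := by
      simp only [divsN, List.foldl_cons]
      exact ih (expN [1] pa.1 pa.2)
    rw [hD]
    simp only [expN, List.flatMap_assoc, List.flatMap_map, List.map_flatMap, List.map_map,
      List.flatMap_cons, List.flatMap_nil, List.append_nil,
      Function.comp_def, one_mul, mul_assoc]

theorem divsN_cons (p a : ℕ) (F : List (ℕ × ℕ)) :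
    divsN ((p, a) :: F)
      = (List.range (a + 1)).flatMap (fun b => (divsN F).map (fun r => p ^ b * r)) := by
  have h := foldl_expN F (expN [1] p a)
  simp only [divsN, List.foldl_cons] at h ⊢
  rw [h]
  simp only [expN, List.flatMap_cons, List.flatMap_nil, List.append_nil, one_mul,
    List.flatMap_map]

theorem dvd_primePow_mul (p a P x : ℕ) (hp : Nat.Prime p) :
    x ∣ p ^ a * P ↔ ∃ b, b ≤ a ∧ ∃ r, r ∣ P ∧ x = p ^ b * r := by
  constructor
  · intro h
    obtain ⟨u, v, hu, hv, rfl⟩ := dvd_mul.mp h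
    obtain ⟨b, hb, rfl⟩ := (Nat.dvd_prime_pow hp).mp hu
    exact ⟨b, hb, v, hv, rfl⟩
  · rintro ⟨b, hb, r, hr, rfl⟩
    exact mul_dvd_mul (pow_dvd_pow p hb) hr

theorem divsN_spec : ∀ (F : List (ℕ × ℕ)), GoodF F →
    (divsN F).Nodup ∧ (divsN F).toFinset = (prodF F).divisors := by
  intro F
  induction F with
  | nil =>
    intro _
    constructor
    · simp [divsN]
    · simp [divsN, prodF, Nat.divisors_one]
  | cons pa F ih =>
    rintro ⟨hprimes, hpw⟩
    obtain ⟨p, a⟩ := pa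
    have hGF : GoodF F := ⟨fun q hq => hprimes q (List.mem_cons_of_mem _ hq),
      (List.pairwise_cons.mp hpw).2⟩
    obtain ⟨hnd, hfs⟩ := ih hGF
    have hp : Nat.Prime p := hprimes (p, a) List.mem_cons_self
    have hplt : ∀ q ∈ F.map Prod.fst, p < q := (List.pairwise_cons.mp hpw).1
    have hP0 : 0 < prodF F := by
      apply List.prod_pos
      intro x hx
      obtain ⟨pa', hpa', rfl⟩ := List.mem_map.mp hx
      exact pow_pos (hGF.1 pa' hpa').pos _
    have hpcop : Nat.Coprime p (prodF F) := by
      apply Nat.coprime_list_prod_right_iff.mpr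
      intro x hx
      obtain ⟨pa', hpa', rfl⟩ := List.mem_map.mp hx
      apply Nat.Coprime.pow_right
      have hq : Nat.Prime pa'.1 := hGF.1 pa' hpa'
      have hne : p ≠ pa'.1 := by
        have := hplt pa'.1 (List.mem_map.mpr ⟨pa', hpa', rfl⟩)
        omega
      exact (Nat.coprime_primes hp hq).mpr hne
    have hdivdvd : ∀ r ∈ divsN F, r ∣ prodF F := by
      intro r hr
      have : r ∈ (divsN F).toFinset := List.mem_toFinset.mpr hr
      rw [hfs] at this
      exact (Nat.mem_divisors.mp this).1
    have hrcop : ∀ r ∈ divsN F, Nat.Coprime p r :=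
      fun r hr => Nat.Coprime.coprime_dvd_right (hdivdvd r hr) hpcop
    have hprodcons : prodF ((p, a) :: F) = p ^ a * prodF F := by
      simp [prodF]
    constructor
    · rw [divsN_cons, List.nodup_flatMap]
      constructor
      · intro b _
        apply hnd.map
        intro r1 r2 hr
        exact Nat.eq_of_mul_eq_mul_left (pow_pos hp.pos b) hr
      · have : (List.range (a + 1)).Pairwise (· < ·) := List.pairwise_lt_range
        apply this.imp
        intro b1 b2 hb12 x hx1 hx2
        obtain ⟨r1, hr1, hx1'⟩ := List.mem_map.mp hx1
        obtain ⟨r2, hr2, hx2'⟩ := List.mem_map.mp hx2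
        have heq : p ^ b1 * r1 = p ^ b2 * r2 := by rw [hx1', hx2']
        have hsplit : p ^ b2 = p ^ b1 * p ^ (b2 - b1) := by
          rw [← pow_add]
          congr 1
          omega
        rw [hsplit, mul_assoc] at heq
        have hr1eq : r1 = p ^ (b2 - b1) * r2 :=
          Nat.eq_of_mul_eq_mul_left (pow_pos hp.pos b1) heq
        have hpdvd : p ∣ r1 := by
          rw [hr1eq]
          exact Dvd.dvd.mul_right (dvd_pow_self p (by omega)) r2
        have h1 := Nat.Prime.one_lt hp
        have hcop := hrcop r1 hr1
        have := Nat.Coprime.eq_one_of_dvd hcop hpdvd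
        omega
    · rw [divsN_cons, hprodcons]
      ext x
      simp only [List.mem_toFinset, List.mem_flatMap, List.mem_map, List.mem_range,
        Nat.mem_divisors]
      constructor
      · rintro ⟨b, hb, r, hr, rfl⟩
        refine ⟨?_, ?_⟩
        · exact mul_dvd_mul (pow_dvd_pow p (by omega)) (hdivdvd r hr)
        · have hr0 : 0 < r := Nat.pos_of_dvd_of_pos (hdivdvd r hr) hP0
          have hp0 := hp.pos
          positivity
      · rintro ⟨hdvd, h0⟩
        obtain ⟨b, hb, r, hr, rfl⟩ := (dvd_primePow_mul p a (prodF F) x hp).mp hdvd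
        refine ⟨b, by omega, r, ?_, rfl⟩
        rw [← List.mem_toFinset, hfs]
        exact Nat.mem_divisors.mpr ⟨hr, by omega⟩

-- ---- assembly helpers ----
theorem cofactor_prime (m' d' : ℕ) (h1 : 1 < m') (hlt : m' < d' * d')
    (hmin : ∀ p, Nat.Prime p → p ∣ m' → d' ≤ p) : Nat.Prime m' := by
  have hp := Nat.minFac_prime (show m' ≠ 1 by omega)
  have hpd := Nat.minFac_dvd m'
  have hd'p := hmin _ hp hpd
  have hm : m'.minFac * (m' / m'.minFac) = m' := Nat.mul_div_cancel' hpd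
  by_cases hcc : m' / m'.minFac = 1
  · rw [hcc, mul_one] at hm
    exact hm ▸ hp
  · exfalso
    have hc1 : 1 ≤ m' / m'.minFac := (Nat.one_le_div_iff hp.pos).mpr (Nat.minFac_le (by omega))
    have hq := Nat.minFac_prime hcc
    have hcd : (m' / m'.minFac) ∣ m' := ⟨m'.minFac, (Nat.div_mul_cancel hpd).symm⟩
    have hqd : (m' / m'.minFac).minFac ∣ m' := dvd_trans (Nat.minFac_dvd _) hcd
    have hd'q := hmin _ hq hqd
    have hge : d' * d' ≤ m' := by
      calc d' * d' ≤ m'.minFac * (m' / m'.minFac).minFac := Nat.mul_le_mul hd'p hd'q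
        _ ≤ m'.minFac * (m' / m'.minFac) := Nat.mul_le_mul_left _ (Nat.minFac_le (by omega))
        _ = m' := hm
    omega

theorem expand_cast : ∀ (F : List (ℕ × ℕ)) (ds : List ℕ),
    (F.map (fun pa => ((pa.1 : Int), (pa.2 : Int)))).foldl
        (fun ds pa => expandDivs ds pa.1 pa.2) (ds.map (fun (q : ℕ) => (q : Int)))
      = (F.foldl (fun ds pa => expN ds pa.1 pa.2) ds).map (fun (q : ℕ) => (q : Int)) := by
  intro F
  induction F with
  | nil => intro ds; simp
  | cons pa F ih =>
    intro ds
    simp only [List.map_cons, List.foldl_cons]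
    rw [← ih (expN ds pa.1 pa.2)]
    congr 1
    have hc : ((pa.2 : Int) + 1) = ((pa.2 + 1 : ℕ) : Int) := by push_cast; ring
    simp only [expandDivs, expN, hc, PySem.List.pyRange_zero_nat, List.flatMap_map,
      List.map_map, Function.comp_def, Int.toNat_natCast]
    simp [List.map_flatMap, List.map_map, Function.comp_def]

-- ---- assembly ----
theorem f_eq_f_alt_of_pos (n : Int) (hn : 1 ≤ n) : f n = f_alt n := by
  have hk : 1 ≤ n.toNat := by omega
  set k := n.toNat with hkdef
  set M : ℕ := 2 ^ k - 1 with hM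
  have h2k : 2 ≤ 2 ^ k := by
    calc 2 = 2 ^ 1 := rfl
      _ ≤ 2 ^ k := Nat.pow_le_pow_right (by norm_num) hk
  have hM1 : 1 ≤ M := by omega
  have hMc : ((M : ℕ) : Int) = 2 ^ k - 1 := by
    rw [hM, Nat.cast_sub (by omega)]
    push_cast
    ring
  -- A side
  have hA : f n = ∑ j ∈ M.divisors.filter (fun j => j * j ≤ M), contrib M j := by
    show loopA (2 ^ n.toNat - 1) (2 ^ n.toNat - 1 : Int).toNat 1 0 = _
    rw [← hkdef, ← hMc, Int.toNat_natCast]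
    have h1 : ((1 : ℕ) : Int) = (1 : Int) := by norm_cast
    rw [← h1, loopA_eq_sum M M 1 0 (le_refl 1) (by have := Nat.sqrt_le_self M; omega)]
    have hfilt : M.divisors.filter (fun j => 1 ≤ j ∧ j * j ≤ M)
        = M.divisors.filter (fun j => j * j ≤ M) := by
      apply Finset.filter_congr
      intro j hj
      have := Nat.pos_of_mem_divisors hj
      constructor
      · rintro ⟨_, h⟩; exact h
      · intro h; exact ⟨by omega, h⟩
    rw [hfilt]
    ring
  -- B side : factorization
  obtain ⟨m', L', d', heq, hprod, hL', hpw', hm'1, hlt', hmin'⟩ :=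
    factLoop_spec M M 2 [] (le_refl 2) hM1 (by omega)
      (fun p hp _ => hp.two_le) (by simp) (by simp)
  simp only [List.map_nil, prodF, List.prod_nil, mul_one] at heq hprod
  -- the combined factor list
  set F : List (ℕ × ℕ) := if 1 < m' then L' ++ [(m', 1)] else L' with hF
  have hd'm' : 1 < m' → d' ≤ m' := by
    intro h
    exact hmin' m' (cofactor_prime m' d' h hlt' hmin') dvd_rfl
  have hGoodF : GoodF F := by
    by_cases h : 1 < m'
    · have hm'p : Nat.Prime m' := cofactor_prime m' d' h hlt' hmin'
      refine ⟨?_, ?_⟩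
      · intro pa hpa
        rw [hF, if_pos h] at hpa
        rcases List.mem_append.mp hpa with hh | hh
        · exact (hL' pa hh).1
        · simp only [List.mem_singleton] at hh
          subst hh
          exact hm'p
      · rw [hF, if_pos h, List.map_append, List.pairwise_append]
        refine ⟨hpw', by simp, ?_⟩
        intro x hx y hy
        simp only [List.map_singleton, List.mem_singleton] at hy
        subst hy
        obtain ⟨pa, hpa, rfl⟩ := List.mem_map.mp hx
        have := (hL' pa hpa).2
        have := hd'm' h
        omega
    · refine ⟨fun pa hpa => (hL' pa (by rwa [hF, if_neg h] at hpa)).1, ?_⟩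
      rw [hF, if_neg h]
      exact hpw'
  have hprodF : prodF F = M := by
    by_cases h : 1 < m'
    · rw [hF, if_pos h]
      unfold prodF
      rw [List.map_append, List.prod_append]
      simp only [List.map_singleton, List.prod_singleton, pow_one]
      rw [mul_comm]
      exact hprod
    · have hm'e : m' = 1 := by omega
      rw [hF, if_neg h]
      rw [hm'e, one_mul] at hprod
      exact hprod
  obtain ⟨hndF, hfsF⟩ := divsN_spec F hGoodF
  rw [hprodF] at hfsF
  -- B side : unfold f_alt
  show f n = _
  unfold f_alt
  rw [← hkdef, ← hMc]
  rw [if_neg (by exact_mod_cast (show ¬ ((M : Int) ≤ 0) by exact_mod_cast by omega))]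
  rw [Int.toNat_natCast]
  simp only [Nat.cast_ofNat] at heq
  rw [heq]
  dsimp only
  -- the 'fac' step
  have hfac : (if ((m' : Int) > 1)
        then (L'.map (fun pa => ((pa.1 : Int), (pa.2 : Int)))) ++ [((m' : Int), 1)]
        else L'.map (fun pa => ((pa.1 : Int), (pa.2 : Int))))
      = F.map (fun pa => ((pa.1 : Int), (pa.2 : Int))) := by
    by_cases h : 1 < m'
    · rw [if_pos (by exact_mod_cast h), hF, if_pos h]
      simp
    · rw [if_neg (by exact_mod_cast h), hF, if_neg h]
  rw [hfac]
  -- the divisor enumeration step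
  have hdivs : (F.map (fun pa => ((pa.1 : Int), (pa.2 : Int)))).foldl
      (fun ds pa => expandDivs ds pa.1 pa.2) [1]
      = (divsN F).map (fun (q : ℕ) => (q : Int)) := by
    have := expand_cast F [1]
    simpa [divsN] using this
  rw [hdivs]
  -- the final sum
  rw [List.foldl_map]
  have hstep : (fun (ret : Int) (q : ℕ) =>
        if (q : Int) * q ≤ (M : Int) then ret + q + PySem.Int.floordiv (M : Int) q + 2 else ret)
      = fun (ret : Int) (q : ℕ) => ret + (if q * q ≤ M then contrib M q else 0) := by
    funext ret q
    rw [PySem.Int.floordiv_natCast]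
    by_cases h : q * q ≤ M
    · rw [if_pos (by exact_mod_cast h), if_pos h]
      simp only [contrib]
      ring
    · rw [if_neg (by exact_mod_cast h), if_neg h]
      simp
  rw [hstep, PySem.List.foldl_add]
  have hsum : (List.map (fun q => if q * q ≤ M then contrib M q else 0) (divsN F)).sum
      = ∑ q ∈ (divsN F).toFinset, (if q * q ≤ M then contrib M q else 0) :=
    (List.sum_toFinset _ hndF).symm
  rw [hsum, hfsF, ← Finset.sum_filter]
  rw [hA, zero_add]

theorem f_spec' : ∀ (n : Int), 0 ≤ n → f n = f_alt n := by
  intro n hn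
  rcases eq_or_lt_of_le hn with h | h
  · subst h; rfl
  · exact f_eq_f_alt_of_pos n h

-- ===== VERDICT (by name: the statement is the Claim_ definition above) =====
theorem f_spec : Claim_equal_f := by
  intro n _ hp
  unfold Spec_f
  exact f_spec' n hp
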